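-- pv_equiv track=rewrite | github.com/veritas1209/Dreamhack | solved/2276/solve.py | generate_line_possibilities
-- ===== SOURCE A (Python) =====
-- def generate_line_possibilities(length, clues):
--     """주어진 길이와 단서로 가능한 모든 라인 패턴을 생성 (최적화)"""
--     if not clues:
--         return [[0] * length]
--
--     # 메모이제이션을 위한 캐시
--     cache = {}
--
--     def solve(pos, block_idx, current_pattern):
--         cache_key = (pos, block_idx, tuple(current_pattern))
--         if cache_key in cache:
--             return cache[cache_key]
--
--         if block_idx == len(clues):
--             result = [current_pattern + [0] * (length - len(current_pattern))]
--             cache[cache_key] = result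
--             return result
--
--         results = []
--         block_size = clues[block_idx]
--         remaining_blocks = clues[block_idx + 1:]
--         min_space_needed = sum(remaining_blocks) + len(remaining_blocks)
--         max_start = length - block_size - min_space_needed
--
--         for start in range(pos, max_start + 1):
--             new_pattern = current_pattern + [0] * (start - len(current_pattern))
--             new_pattern.extend([1] * block_size)
--             if block_idx < len(clues) - 1:
--                 new_pattern.append(0)
--                 results.extend(solve(len(new_pattern), block_idx + 1, new_pattern))
--             else:
--                 results.extend(solve(len(new_pattern), block_idx + 1, new_pattern))
--
--         cache[cache_key] = results
--         return results
--
--     return solve(0, 0, [])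
-- ===== SOURCE B (Python) =====
-- def generate_line_possibilities(length, clues):
--     """Closed-form slack distribution: compute the free slack once and enumerate
--     its compositions over the k+1 gaps, building each row by concatenation."""
--     if not clues:
--         return [[0] * length]
--     free = length - sum(clues) - (len(clues) - 1)
--     if free < 0:
--         return []
--
--     def build(free, blocks):
--         first, rest = blocks[0], blocks[1:]
--         if not rest:
--             return [[0] * g + [1] * first + [0] * (free - g)
--                     for g in range(free + 1)]
--         return [[0] * g + [1] * first + [0] + tail
--                 for g in range(free + 1)
--                 for tail in build(free - g, rest)]
--
--     return build(free, clues)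
-- ===== Notes on version B (the rewrite author's own statement) =====
-- stated objective: alternative
-- what changed: B computes the total slack free = length - sum(clues) - (len(clues)-1) once and enumerates its compositions over the gaps, assembling each row by suffix concatenation, instead of A's memoised recursion over absolute start positions that recomputes suffix sums per level and pads a growing prefix.
-- outside the precondition, e.g. on generate_line_possibilities(0, [-1]): A returns [[], [0]], B returns [[0], [0]]
import Mathlib
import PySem

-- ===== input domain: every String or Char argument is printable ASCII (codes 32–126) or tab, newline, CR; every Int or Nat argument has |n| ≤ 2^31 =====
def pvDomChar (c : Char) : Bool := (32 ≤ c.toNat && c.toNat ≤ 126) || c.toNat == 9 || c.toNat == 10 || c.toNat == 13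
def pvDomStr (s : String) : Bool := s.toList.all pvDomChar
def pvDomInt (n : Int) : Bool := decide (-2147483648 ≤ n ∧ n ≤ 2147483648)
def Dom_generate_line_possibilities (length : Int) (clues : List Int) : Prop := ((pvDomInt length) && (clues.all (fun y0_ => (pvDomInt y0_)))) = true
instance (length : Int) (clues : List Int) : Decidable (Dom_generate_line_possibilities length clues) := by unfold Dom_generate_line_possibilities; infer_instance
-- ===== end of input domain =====

-- B enumerates compositions of the total slack over the gaps instead of A's recursion
-- over absolute start positions (alternative decomposition, same cost).


-- ===== PORT A =====
-- A's `cache` is pure memoisation (the key (pos, block_idx, tuple(pattern)) functionally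
-- determines solve's result), so it never changes the returned value; the port recomputes
-- instead of caching.  `clues[block_idx]` is in range on every reachable call
-- (block_idx < len(clues) in the else branch), ported as pyGetD; the base-case test
-- `block_idx == len(clues)` is ported as `len ≤ block_idx`, equal on every reachable call
-- (block_idx never exceeds len) and giving the termination measure.
def pvSolveA (length : Int) (clues : List Int) : Int → Nat → List Int → List (List Int) :=
  fun pos block_idx pattern =>
    if h : clues.length ≤ block_idx then
      [pattern ++ List.replicate (length - (pattern.length : Int)).toNat 0]
    else
      let block_size := PySem.List.pyGetD clues (block_idx : Int) 0
      let remaining_blocks := PySem.List.slice clues (some ((block_idx : Int) + 1)) none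
      let min_space_needed := remaining_blocks.sum + (remaining_blocks.length : Int)
      let max_start := length - block_size - min_space_needed
      (PySem.List.pyRange pos (max_start + 1) 1).foldl
        (fun results start =>
          let np1 := pattern ++ List.replicate (start - (pattern.length : Int)).toNat 0
          let np2 := np1 ++ List.replicate block_size.toNat 1
          if block_idx < clues.length - 1 then
            let np3 := np2 ++ [0]
            results ++ pvSolveA length clues (np3.length : Int) (block_idx + 1) np3
          else
            results ++ pvSolveA length clues (np2.length : Int) (block_idx + 1) np2)
        []
termination_by _ block_idx _ => clues.length - block_idx
decreasing_by all_goals omega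

def generate_line_possibilities (length : Int) (clues : List Int) : List (List Int) :=
  if clues = [] then [List.replicate length.toNat 0]
  else pvSolveA length clues 0 0 []

-- ===== PORT B =====
def pvBuild (free : Int) (blocks : List Int) : List (List Int) :=
  match blocks with
  | [] => []   -- unreachable: Source B's unpacking `first, rest = blocks[0], blocks[1:]` needs blocks ≠ []
  | first :: rest =>
    if rest.isEmpty then
      (PySem.List.pyRange 0 (free + 1) 1).map
        (fun g => List.replicate g.toNat 0 ++ List.replicate first.toNat 1
                    ++ List.replicate (free - g).toNat 0)
    else
      (PySem.List.pyRange 0 (free + 1) 1).flatMap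
        (fun g => (pvBuild (free - g) rest).map
          (fun tail => List.replicate g.toNat 0 ++ List.replicate first.toNat 1
                         ++ [0] ++ tail))

def generate_line_possibilities_alt (length : Int) (clues : List Int) : List (List Int) :=
  if clues = [] then [List.replicate length.toNat 0]
  else
    let free := length - clues.sum - ((clues.length : Int) - 1)
    if free < 0 then [] else pvBuild free clues

-- ===== PRECONDITION & SPEC =====
-- Pre_ excludes clue lists that contain a negative block size (not a meaningful nonogram
-- clue) while the slack length - sum(clues) - (len(clues)-1) is still nonnegative: there A
-- pads with wrong-length rows as an artefact of its arithmetic and B enumerates a different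
-- pattern list.  Negative-slack inputs stay inside Pre_ (both programs return []).
def Pre_generate_line_possibilities (length : Int) (clues : List Int) : Prop :=
  (∀ c ∈ clues, 0 ≤ c) ∨ length - clues.sum - ((clues.length : Int) - 1) < 0
instance (length : Int) (clues : List Int) : Decidable (Pre_generate_line_possibilities length clues) := by
  unfold Pre_generate_line_possibilities; infer_instance

def pvWitness_generate_line_possibilities : Int × List Int := (5, [2, 1])

def Spec_generate_line_possibilities (length : Int) (clues : List Int) (out : List (List Int)) : Prop := out = generate_line_possibilities_alt length clues
instance (length : Int) (clues : List Int) (out : List (List Int)) : Decidable (Spec_generate_line_possibilities length clues out) := by unfold Spec_generate_line_possibilities; infer_instance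

-- ===== CLAIM (what is proved, stated in full; the proofs are below) =====
def Claim_equal_generate_line_possibilities : Prop := ∀ (length : Int) (clues : List Int), Dom_generate_line_possibilities length clues → Pre_generate_line_possibilities length clues → Spec_generate_line_possibilities length clues (generate_line_possibilities length clues)

-- ===== LEMMAS AND PROOFS =====

-- pvBuild on a nonempty block list with negative slack yields no pattern (the range is empty).
lemma pvBuild_neg {f : Int} (hf : f < 0) (b : Int) (rest : List Int) :
    pvBuild f (b :: rest) = [] := by
  have h : f + 1 ≤ 0 := by omega
  cases rest <;>
    simp [pvBuild, PySem.List.pyRange_one_eq_nil h]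

-- If the very first block cannot be placed (negative remaining slack), A's first-level
-- range is empty and solve returns [] immediately, whatever the clue values are.
lemma solveA_first_empty (length : Int) (clues : List Int) (i : Nat) (pos : Int)
    (pattern : List Int) (b : Int) (rest : List Int) (hdrop : clues.drop i = b :: rest)
    (hf : length - pos - b - rest.sum - (rest.length : Int) < 0) :
    pvSolveA length clues pos i pattern = [] := by
  have hi : i < clues.length := by
    by_contra h
    rw [List.drop_eq_nil_of_le (Nat.le_of_not_lt h)] at hdrop
    simp at hdrop
  have hget : clues[i]? = some b := by
    have := congrArg List.head? hdrop
    rwa [List.head?_drop] at this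
  have hdrop1 : clues.drop (i + 1) = rest := by
    have := congrArg List.tail hdrop
    rwa [List.tail_drop] at this
  have hcast : ((i : Int) + 1).toNat = i + 1 := by omega
  have hgetD : PySem.List.pyGetD clues ((i : Nat) : Int) 0 = b := by
    rw [PySem.List.pyGetD_natCast]
    simp [List.getD_eq_getElem?_getD, hget]
  have hslice : PySem.List.slice clues (some ((i : Int) + 1)) none = rest := by
    rw [PySem.List.slice_from clues (by omega), hcast, hdrop1]
  rw [pvSolveA, dif_neg (by omega : ¬ clues.length ≤ i)]
  simp only [hgetD, hslice]
  rw [PySem.List.pyRange_one_eq_nil (by omega)]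
  simp

-- Main invariant: on a nonempty suffix bs of clues with nonnegative entries, A's solve
-- from a prefix `pattern` returns every row of pvBuild for the remaining slack, prefixed
-- by `pattern` (including the empty result when the slack is negative).
lemma solve_eq (length : Int) (bs : List Int) :
    ∀ (clues : List Int) (i : Nat) (pattern : List Int),
      bs ≠ [] → (∀ x ∈ bs, 0 ≤ x) → clues.drop i = bs →
      pvSolveA length clues (pattern.length : Int) i pattern =
        (pvBuild (length - (pattern.length : Int) - bs.sum - ((bs.length : Int) - 1)) bs).map
          (fun row => pattern ++ row) := by
  induction bs with
  | nil => intro _ _ _ h; exact absurd rfl h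
  | cons b rest ih =>
    intro clues i pattern _ hnn hdrop
    have hb : 0 ≤ b := hnn b (by simp)
    have hi : i < clues.length := by
      by_contra h
      rw [List.drop_eq_nil_of_le (Nat.le_of_not_lt h)] at hdrop
      simp at hdrop
    have hlen : clues.length = i + 1 + rest.length := by
      have := congrArg List.length hdrop
      simp [List.length_drop] at this
      omega
    have hget : clues[i]? = some b := by
      have := congrArg List.head? hdrop
      rwa [List.head?_drop] at this
    have hdrop1 : clues.drop (i + 1) = rest := by
      have := congrArg List.tail hdrop
      rwa [List.tail_drop] at this
    rw [pvSolveA]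
    rw [dif_neg (by omega : ¬ clues.length ≤ i)]
    have hcast : ((i : Int) + 1).toNat = i + 1 := by omega
    have hgetD : PySem.List.pyGetD clues ((i : Nat) : Int) 0 = b := by
      rw [PySem.List.pyGetD_natCast]
      simp [List.getD_eq_getElem?_getD, hget]
    have hslice : PySem.List.slice clues (some ((i : Int) + 1)) none = rest := by
      rw [PySem.List.slice_from clues (by omega), hcast, hdrop1]
    simp only [hgetD, hslice]
    cases rest with
    | nil =>
      simp only [List.length_nil, Nat.add_zero] at hlen
      have hc : ¬ (i < clues.length - 1) := by omega
      have hbase : ∀ (q : List Int), pvSolveA length clues ((q.length : Int)) (i + 1) q =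
          [q ++ List.replicate (length - (q.length : Int)).toNat 0] := by
        intro q
        rw [pvSolveA, dif_pos (by omega)]
      simp only [if_neg hc, hbase]
      rw [PySem.List.foldl_append_eq_flatMap]
      simp only [List.sum_nil, List.length_nil, List.sum_cons, List.length_cons, List.nil_append]
      rw [pvBuild]
      simp only [List.isEmpty_nil, if_pos]
      rw [PySem.List.pyRange_one, PySem.List.pyRange_one]
      rw [List.flatMap_map, List.map_map, List.map_map]
      rw [← List.map_eq_flatMap]
      have hN : (length - b - ((0:Int) + (0:Nat)) + 1 - (pattern.length : Int)).toNat =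
          (length - (pattern.length : Int) - (b + 0) - (((0:Nat) + 1 : Int) - 1) + 1 - 0).toNat := by
        omega
      rw [hN]
      refine List.map_congr_left ?_
      intro k _
      have h1 : ((pattern.length : Int) + (k : Int) - (pattern.length : Int)).toNat = k := by omega
      simp only [Function.comp, List.append_assoc, List.length_append, List.length_replicate,
        h1, Int.toNat_natCast, Int.zero_add]
      congr 4
      omega
    | cons r rs =>
      simp only [List.length_cons] at hlen
      have hc : i < clues.length - 1 := by omega
      have hnnr : ∀ x ∈ r :: rs, 0 ≤ x := fun x hx => hnn x (List.mem_cons_of_mem _ hx)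
      have hrec : ∀ (q : List Int), pvSolveA length clues ((q.length : Int)) (i + 1) q =
          (pvBuild (length - (q.length : Int) - (r :: rs).sum - (((r :: rs).length : Int) - 1))
              (r :: rs)).map (fun row => q ++ row) :=
        fun q => ih clues (i + 1) q (by simp) hnnr hdrop1
      simp only [if_pos hc, hrec]
      rw [PySem.List.foldl_append_eq_flatMap]
      rw [pvBuild]
      simp only [List.isEmpty_cons, Bool.false_eq_true, if_false]
      rw [List.map_flatMap]
      rw [PySem.List.pyRange_one, PySem.List.pyRange_one]
      rw [List.flatMap_map, List.flatMap_map]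
      simp only [List.nil_append]
      have hN : (length - b - ((r :: rs).sum + ((r :: rs).length : Int)) + 1 - (pattern.length : Int)).toNat =
          (length - (pattern.length : Int) - (b :: r :: rs).sum - (((b :: r :: rs).length : Int) - 1) + 1 - 0).toNat := by
        simp only [List.sum_cons, List.length_cons]
        push_cast
        omega
      rw [hN]
      congr 1
      funext a
      have h1 : ((pattern.length : Int) + (a : Int) - (pattern.length : Int)).toNat = a := by omega
      simp only [h1, List.map_map]
      congr 1
      · funext row
        simp [Function.comp, List.append_assoc]
      · congr 1
        simp only [List.sum_cons, List.length_cons, List.length_append, List.length_replicate,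
          List.length_nil]
        push_cast
        omega



-- ===== VERDICT (by name: the statement is the Claim_ definition above) =====
theorem generate_line_possibilities_spec : Claim_equal_generate_line_possibilities := by
  intro length clues _hdom hpre
  unfold Spec_generate_line_possibilities
  unfold generate_line_possibilities generate_line_possibilities_alt
  by_cases hnil : clues = []
  · simp [hnil]
  · simp only [if_neg hnil]
    obtain ⟨b, rest, rfl⟩ : ∃ b rest, clues = b :: rest := by
      cases clues with
      | nil => exact absurd rfl hnil
      | cons b rest => exact ⟨b, rest, rfl⟩
    rcases hpre with hnn | hneg
    · have h := solve_eq length (b :: rest) (b :: rest) 0 [] hnil hnn (by simp)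
      simp only [List.length_nil, Int.natCast_zero, Int.sub_zero] at h
      rw [h]
      by_cases hneg : length - (b :: rest).sum - (((b :: rest).length : Int) - 1) < 0
      · rw [if_pos hneg, pvBuild_neg hneg]
        simp
      · rw [if_neg hneg]
        simp
    · have hf : length - 0 - b - rest.sum - (rest.length : Int) < 0 := by
        simp only [List.sum_cons, List.length_cons] at hneg
        push_cast at hneg
        omega
      rw [solveA_first_empty length (b :: rest) 0 0 [] b rest (by simp) hf]
      rw [if_pos (by simp only [List.sum_cons, List.length_cons]; push_cast; omega)]
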